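-- pv_equiv track=rewrite | github.com/ericliu1002000/cough | analysis/views/pivot_nested.py | _build_row_span_map
-- ===== SOURCE A (Python) =====
-- from typing import List
--
-- def _build_row_span_map(
--     row_keys: List[dict], row_cols: List[str]
-- ) -> List[dict[int, int]]:
--     """Return per-level rowspan maps for contiguous row key prefixes."""
--     if not row_cols or not row_keys:
--         return []
--
--     span_map: List[dict[int, int]] = []
--     for level in range(len(row_cols)):
--         level_spans: dict[int, int] = {}
--         start = 0
--         prev_prefix = None
--         for idx in range(len(row_keys) + 1):
--             if idx < len(row_keys):
--                 prefix = tuple(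
--                     row_keys[idx].get(col, "") for col in row_cols[: level + 1]
--                 )
--             else:
--                 prefix = None
--             if idx == 0:
--                 prev_prefix = prefix
--             if idx == len(row_keys) or prefix != prev_prefix:
--                 level_spans[start] = idx - start
--                 start = idx
--                 prev_prefix = prefix
--         span_map.append(level_spans)
--     return span_map
-- ===== SOURCE B (Python) =====
-- def _build_row_span_map(row_keys, row_cols):
--     if not row_cols or not row_keys:
--         return []
--     n, L = len(row_keys), len(row_cols)
--     # first column index at which adjacent rows differ (L if they agree on every column)
--     diffs = [
--         next((j for j, col in enumerate(row_cols) if a.get(col, "") != b.get(col, "")), L)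
--         for a, b in zip(row_keys, row_keys[1:])
--     ]
--     span_map = []
--     for level in range(L):
--         spans = {}
--         start = 0
--         for i, d in enumerate(diffs):
--             if d <= level:
--                 spans[start] = i + 1 - start
--                 start = i + 1
--         spans[start] = n - start
--         span_map.append(spans)
--     return span_map
-- ===== Notes on version B (the rewrite author's own statement) =====
-- stated objective: faster
-- what changed: Instead of rebuilding length-(level+1) prefix tuples for every row at every level, B computes once per adjacent row pair the first column index where they differ, then derives every level's spans from those break indices in one pass per level.
import Mathlib
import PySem

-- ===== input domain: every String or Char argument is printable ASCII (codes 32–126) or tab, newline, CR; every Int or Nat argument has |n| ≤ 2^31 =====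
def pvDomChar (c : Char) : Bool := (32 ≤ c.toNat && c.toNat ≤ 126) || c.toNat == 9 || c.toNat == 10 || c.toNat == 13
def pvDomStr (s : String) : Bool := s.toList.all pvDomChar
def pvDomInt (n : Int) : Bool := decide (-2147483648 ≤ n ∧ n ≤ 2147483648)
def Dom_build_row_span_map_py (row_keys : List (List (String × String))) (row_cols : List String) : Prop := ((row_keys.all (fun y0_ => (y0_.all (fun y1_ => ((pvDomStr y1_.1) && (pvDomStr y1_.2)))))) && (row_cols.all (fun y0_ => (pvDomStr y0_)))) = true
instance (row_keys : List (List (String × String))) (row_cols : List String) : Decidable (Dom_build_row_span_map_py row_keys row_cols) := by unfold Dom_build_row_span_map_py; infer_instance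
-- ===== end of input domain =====

-- B replaces A's per-level re-computation of length-(level+1) prefix tuples by one pass computing,
-- for each adjacent row pair, the first column where they differ; spans per level then follow from
-- those break indices (objective: faster, O(N·L) instead of O(N·L²)).

-- ===== PORT A =====
def build_row_span_map_py (row_keys : List (List (String × String))) (row_cols : List String) : List (List (Int × Int)) :=
  if row_cols = [] ∨ row_keys = [] then []
  else
    (PySem.List.pyRange 0 (row_cols.length : Int) 1).foldl (fun span_map level =>
      let st := (PySem.List.pyRange 0 ((row_keys.length : Int) + 1) 1).foldl
        (fun (st : PySem.Dict Int Int × Int × Option (List String)) idx =>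
          let prefix? : Option (List String) :=
            if idx < (row_keys.length : Int) then
              some ((PySem.List.slice row_cols (some 0) (some (level + 1))).map
                (fun col => PySem.Dict.getD (PySem.Dict.mk ((PySem.List.pyGet? row_keys idx).getD [])) col ""))
            else none
          let prev := if idx = 0 then prefix? else st.2.2
          if idx = (row_keys.length : Int) ∨ prefix? ≠ prev then
            (PySem.Dict.insert st.1 st.2.1 (idx - st.2.1), idx, prefix?)
          else (st.1, st.2.1, prev))
        (PySem.Dict.empty, 0, none)
      span_map ++ [st.1.items]) []

-- ===== PORT B =====
-- next((j for j, col in enumerate(row_cols) if …), L) is the first index satisfying the predicate,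
-- with default L = len(row_cols): that is List.findIdx.
def build_row_span_map_py_alt (row_keys : List (List (String × String))) (row_cols : List String) : List (List (Int × Int)) :=
  if row_cols = [] ∨ row_keys = [] then []
  else
    let n : Int := row_keys.length
    let diffs : List Nat := (row_keys.zip row_keys.tail).map (fun ab =>
      row_cols.findIdx (fun col =>
        PySem.Dict.getD (PySem.Dict.mk ab.1) col "" != PySem.Dict.getD (PySem.Dict.mk ab.2) col ""))
    (List.range row_cols.length).map (fun level =>
      let st := (PySem.List.enumerate diffs).foldl
        (fun (st : PySem.Dict Int Int × Int) p =>
          if p.2 ≤ level then (PySem.Dict.insert st.1 st.2 (p.1 + 1 - st.2), p.1 + 1) else st)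
        (PySem.Dict.empty, 0)
      (PySem.Dict.insert st.1 st.2 (n - st.2)).items)

-- ===== PRECONDITION & SPEC =====
def Spec_build_row_span_map_py (row_keys : List (List (String × String))) (row_cols : List String) (out : List (List (Int × Int))) : Prop := out = build_row_span_map_py_alt row_keys row_cols
instance (row_keys : List (List (String × String))) (row_cols : List String) (out : List (List (Int × Int))) : Decidable (Spec_build_row_span_map_py row_keys row_cols out) := by unfold Spec_build_row_span_map_py; infer_instance

-- ===== CLAIM (what is proved, stated in full; the proofs are below) =====
def Claim_equal_build_row_span_map_py : Prop := ∀ (row_keys : List (List (String × String))) (row_cols : List String), Dom_build_row_span_map_py row_keys row_cols → Spec_build_row_span_map_py row_keys row_cols (build_row_span_map_py row_keys row_cols)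

-- ===== LEMMAS AND PROOFS =====

-- The value of row i at column col (Python: row_keys[i].get(col, "")).
def pvVal (row : List (String × String)) (col : String) : String :=
  PySem.Dict.getD (PySem.Dict.mk row) col ""

-- The level-k prefix of row i (first k+1 columns), as A computes it.
def pvPfx (row_keys : List (List (String × String))) (row_cols : List String) (k : Nat) (i : Nat) : List String :=
  (row_cols.take (k + 1)).map (fun col => pvVal (row_keys.getD i []) col)

-- A's inner state and step at level k (indices as Ints, exactly as in the port)
def pvStateA := PySem.Dict Int Int × Int × Option (List String)

def pvPrefix (row_keys : List (List (String × String))) (row_cols : List String) (level : Int) (idx : Int) :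
    Option (List String) :=
  if idx < (row_keys.length : Int) then
    some ((PySem.List.slice row_cols (some 0) (some (level + 1))).map
      (fun col => PySem.Dict.getD (PySem.Dict.mk ((PySem.List.pyGet? row_keys idx).getD [])) col ""))
  else none

def pvStepA (row_keys : List (List (String × String))) (row_cols : List String) (level : Int)
    (st : pvStateA) (idx : Int) : pvStateA :=
  if idx = (row_keys.length : Int) ∨
      pvPrefix row_keys row_cols level idx ≠
        (if idx = 0 then pvPrefix row_keys row_cols level idx else st.2.2) then
    (PySem.Dict.insert st.1 st.2.1 (idx - st.2.1), idx, pvPrefix row_keys row_cols level idx)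
  else (st.1, st.2.1, if idx = 0 then pvPrefix row_keys row_cols level idx else st.2.2)

-- B's inner step at level k
def pvStepB (level : Nat) (st : PySem.Dict Int Int × Int) (p : Int × Nat) : PySem.Dict Int Int × Int :=
  if p.2 ≤ level then (PySem.Dict.insert st.1 st.2 (p.1 + 1 - st.2), p.1 + 1) else st

-- first-differing-column index for adjacent rows i, i+1
def pvDiff (row_keys : List (List (String × String))) (row_cols : List String) (i : Nat) : Nat :=
  row_cols.findIdx (fun col => pvVal (row_keys.getD i []) col != pvVal (row_keys.getD (i+1) []) col)

theorem pv_foldl_append {α β : Type} (f : α → β) (l : List α) (init : List β) :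
    l.foldl (fun acc x => acc ++ [f x]) init = init ++ l.map f := by
  induction l generalizing init with
  | nil => simp
  | cons x xs ih => simp [List.foldl_cons, ih]

-- findIdx ≤ k  ↔  the (k+1)-prefixes of the two value maps differ
theorem pv_findIdx_le_iff (g₁ g₂ : String → String) (cols : List String) (k : Nat)
    (hk : k < cols.length) :
    (cols.findIdx (fun c => g₁ c != g₂ c) ≤ k) ↔
      ¬ ((cols.take (k+1)).map g₁ = (cols.take (k+1)).map g₂) := by
  induction cols generalizing k with
  | nil => simp at hk
  | cons c cs ih =>
    by_cases hc : g₁ c = g₂ c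
    · rw [List.findIdx_cons]
      simp only [hc, bne_self_eq_false, cond_false]
      cases k with
      | zero => simp [hc]
      | succ k' =>
        have := ih k' (by simpa using Nat.lt_of_succ_lt_succ (by simpa using hk))
        simp [List.take_succ_cons, hc, this]
    · rw [List.findIdx_cons]
      have : (g₁ c != g₂ c) = true := by simpa using hc
      simp [this, hc]


-- ----- normal forms of the two ports -----

def pvInnerA (row_keys : List (List (String × String))) (row_cols : List String) (k : Nat) (m : Nat) : pvStateA :=
  (PySem.List.pyRange 0 (m : Int) 1).foldl (pvStepA row_keys row_cols (k : Int)) (PySem.Dict.empty, 0, none)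

def pvDiffs (row_keys : List (List (String × String))) (row_cols : List String) : List Nat :=
  (row_keys.zip row_keys.tail).map (fun ab =>
    row_cols.findIdx (fun col => pvVal ab.1 col != pvVal ab.2 col))

def pvInnerB (row_keys : List (List (String × String))) (row_cols : List String) (k : Nat) (m : Nat) :
    PySem.Dict Int Int × Int :=
  (PySem.List.pyRange 0 (m : Int) 1).foldl
    (fun st j => pvStepB k st (j, PySem.List.pyGetD (pvDiffs row_keys row_cols) j 0)) (PySem.Dict.empty, 0)

theorem pv_portA_eq (row_keys : List (List (String × String))) (row_cols : List String)
    (h : ¬(row_cols = [] ∨ row_keys = [])) :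
    build_row_span_map_py row_keys row_cols =
      (List.range row_cols.length).map (fun k => (pvInnerA row_keys row_cols k (row_keys.length + 1)).1.items) := by
  unfold build_row_span_map_py pvInnerA pvStepA pvPrefix
  rw [if_neg h, PySem.List.pyRange_zero_natCast]
  rw [pv_foldl_append]
  simp [List.map_map]
  intro a ha
  rfl

theorem pv_length_diffs (row_keys : List (List (String × String))) (row_cols : List String) :
    (pvDiffs row_keys row_cols).length = row_keys.length - 1 := by
  simp [pvDiffs]

theorem pv_portB_eq (row_keys : List (List (String × String))) (row_cols : List String)
    (h : ¬(row_cols = [] ∨ row_keys = [])) :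
    build_row_span_map_py_alt row_keys row_cols =
      (List.range row_cols.length).map (fun k =>
        (PySem.Dict.insert (pvInnerB row_keys row_cols k (row_keys.length - 1)).1
          (pvInnerB row_keys row_cols k (row_keys.length - 1)).2
          ((row_keys.length : Int) - (pvInnerB row_keys row_cols k (row_keys.length - 1)).2)).items) := by
  unfold build_row_span_map_py_alt
  rw [if_neg h]
  have hd : ((row_keys.zip row_keys.tail).map (fun ab =>
      row_cols.findIdx (fun col =>
        PySem.Dict.getD (PySem.Dict.mk ab.1) col "" != PySem.Dict.getD (PySem.Dict.mk ab.2) col ""))) =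
      pvDiffs row_keys row_cols := by
    simp [pvDiffs, pvVal]
  rw [hd]
  apply List.map_congr_left
  intro k _
  rw [PySem.List.enumerate_eq_map_pyRange (d := 0), List.foldl_map]
  have : (PySem.List.len (pvDiffs row_keys row_cols)) = ((row_keys.length - 1 : Nat) : Int) := by
    simp [PySem.List.len, pv_length_diffs]
  rw [this]
  rfl

-- ----- one step of each inner loop -----

theorem pv_innerA_succ (row_keys : List (List (String × String))) (row_cols : List String) (k m : Nat) :
    pvInnerA row_keys row_cols k (m + 1) =
      pvStepA row_keys row_cols (k : Int) (pvInnerA row_keys row_cols k m) (m : Int) := by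
  unfold pvInnerA
  have : ((m + 1 : Nat) : Int) = (m : Int) + 1 := by push_cast; ring
  rw [this, PySem.List.pyRange_one_succ_right (by positivity), List.foldl_append]
  rfl

theorem pv_innerB_succ (row_keys : List (List (String × String))) (row_cols : List String) (k m : Nat) :
    pvInnerB row_keys row_cols k (m + 1) =
      pvStepB k (pvInnerB row_keys row_cols k m) ((m : Int), PySem.List.pyGetD (pvDiffs row_keys row_cols) (m : Int) 0) := by
  unfold pvInnerB
  have : ((m + 1 : Nat) : Int) = (m : Int) + 1 := by push_cast; ring
  rw [this, PySem.List.pyRange_one_succ_right (by positivity), List.foldl_append]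
  rfl

-- the prefix A computes at a row index m < len(row_keys) is pvPfx
theorem pv_prefix_eq (row_keys : List (List (String × String))) (row_cols : List String) (k m : Nat)
    (hm : m < row_keys.length) :
    pvPrefix row_keys row_cols (k : Int) (m : Int) = some (pvPfx row_keys row_cols k m) := by
  unfold pvPrefix
  rw [if_pos (by exact_mod_cast hm)]
  have h1 : ((k : Int) + 1) = ((k + 1 : Nat) : Int) := by push_cast; ring
  rw [h1, PySem.List.slice_zero_start, PySem.List.slice_to_natCast]
  simp [pvPfx, pvVal, List.map_take, List.getD_eq_getElem?_getD, List.getElem?_eq_getElem hm]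

-- A's step at an interior index 1 ≤ m < len(row_keys): compare with the stored previous prefix
theorem pv_stepA_mid (row_keys : List (List (String × String))) (row_cols : List String) (k m : Nat)
    (h0 : 1 ≤ m) (hm : m < row_keys.length) (st : pvStateA) :
    pvStepA row_keys row_cols (k : Int) st (m : Int) =
      if some (pvPfx row_keys row_cols k m) ≠ st.2.2 then
        (PySem.Dict.insert st.1 st.2.1 ((m : Int) - st.2.1), (m : Int), some (pvPfx row_keys row_cols k m))
      else (st.1, st.2.1, st.2.2) := by
  unfold pvStepA
  rw [pv_prefix_eq _ _ _ _ hm]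
  have h0' : ¬((m : Int) = 0) := by omega
  have hne : ¬((m : Int) = (row_keys.length : Int)) := by omega
  simp only [if_neg h0', or_iff_right hne]
  rfl

-- the diff entry B reads at m with m + 1 < len(row_keys) is pvDiff
theorem pv_diffs_get (row_keys : List (List (String × String))) (row_cols : List String) (m : Nat)
    (hm : m + 1 < row_keys.length) :
    PySem.List.pyGetD (pvDiffs row_keys row_cols) (m : Int) 0 = pvDiff row_keys row_cols m := by
  have hlt : m < (pvDiffs row_keys row_cols).length := by
    rw [pv_length_diffs]; omega
  rw [PySem.List.pyGetD_natCast, List.getD_eq_getElem _ _ hlt]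
  unfold pvDiffs
  rw [List.getElem_map]
  have hz : (row_keys.zip row_keys.tail)[m]'(by simpa [pvDiffs] using hlt) =
      (row_keys.getD m [], row_keys.getD (m+1) []) := by
    rw [List.getElem_zip]
    simp [List.getElem_tail, List.getD_eq_getElem?_getD,
      List.getElem?_eq_getElem (show m < row_keys.length by omega),
      List.getElem?_eq_getElem hm]
  rw [hz]
  rfl

-- break condition: pvDiff ≤ k  ↔  level-k prefixes of rows m and m+1 differ
theorem pv_break_iff (row_keys : List (List (String × String))) (row_cols : List String) (k m : Nat)
    (hk : k < row_cols.length) :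
    (pvDiff row_keys row_cols m ≤ k) ↔
      ¬ (pvPfx row_keys row_cols k m = pvPfx row_keys row_cols k (m + 1)) := by
  unfold pvDiff pvPfx
  exact pv_findIdx_le_iff _ _ row_cols k hk

-- ----- main invariant -----

theorem pv_inv (row_keys : List (List (String × String))) (row_cols : List String)
    (hn : row_keys ≠ []) (k : Nat) (hk : k < row_cols.length) (m : Nat) (h1 : 1 ≤ m) :
    m ≤ row_keys.length →
    (pvInnerA row_keys row_cols k m).1 = (pvInnerB row_keys row_cols k (m - 1)).1 ∧
    (pvInnerA row_keys row_cols k m).2.1 = (pvInnerB row_keys row_cols k (m - 1)).2 ∧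
    (pvInnerA row_keys row_cols k m).2.2 = some (pvPfx row_keys row_cols k (m - 1)) := by
  induction m, h1 using Nat.le_induction with
  | base =>
    intro _
    have h0 : 0 < row_keys.length := List.length_pos_of_ne_nil hn
    have hp : pvPrefix row_keys row_cols (k : Int) 0 = some (pvPfx row_keys row_cols k 0) := by
      have := pv_prefix_eq row_keys row_cols k 0 h0
      simpa using this
    have hA : pvInnerA row_keys row_cols k 1 = (PySem.Dict.empty, 0, some (pvPfx row_keys row_cols k 0)) := by
      unfold pvInnerA
      rw [show ((1 : Nat) : Int) = 0 + 1 by norm_num, PySem.List.pyRange_one_succ_right le_rfl,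
        PySem.List.pyRange_one_eq_nil le_rfl]
      simp only [List.nil_append, List.foldl_cons, List.foldl_nil]
      unfold pvStepA
      have hz : ¬((0 : Int) = (row_keys.length : Int)) := by omega
      simp [hp, hz]
    have hB : pvInnerB row_keys row_cols k 0 = (PySem.Dict.empty, 0) := by
      unfold pvInnerB
      rw [show ((0 : Nat) : Int) = 0 by norm_num, PySem.List.pyRange_one_eq_nil le_rfl]
      rfl
    rw [hA]
    rw [show (1 : Nat) - 1 = 0 by norm_num, hB]
    exact ⟨rfl, rfl, rfl⟩
  | succ m hm ih =>
    intro hmn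
    obtain ⟨e1, e2, e3⟩ := ih (by omega)
    have hmlt : m < row_keys.length := by omega
    rw [pv_innerA_succ, pv_stepA_mid _ _ k m hm hmlt]
    have hB : pvInnerB row_keys row_cols k (m + 1 - 1) =
        pvStepB k (pvInnerB row_keys row_cols k (m - 1))
          (((m - 1 : Nat) : Int), PySem.List.pyGetD (pvDiffs row_keys row_cols) ((m - 1 : Nat) : Int) 0) := by
      rw [show m + 1 - 1 = (m - 1) + 1 by omega, pv_innerB_succ]
    have hdg : PySem.List.pyGetD (pvDiffs row_keys row_cols) ((m - 1 : Nat) : Int) 0 =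
        pvDiff row_keys row_cols (m - 1) :=
      pv_diffs_get row_keys row_cols (m - 1) (by omega)
    have hbc : (pvDiff row_keys row_cols (m - 1) ≤ k) ↔
        ¬(pvPfx row_keys row_cols k (m - 1) = pvPfx row_keys row_cols k m) := by
      have := pv_break_iff row_keys row_cols k (m - 1) hk
      rwa [show m - 1 + 1 = m by omega] at this
    rw [hB, hdg]
    unfold pvStepB
    by_cases hbr : pvPfx row_keys row_cols k m = pvPfx row_keys row_cols k (m - 1)
    · -- no break at row m
      rw [e3, if_neg (by simp [hbr]), if_neg (by simp [hbc, hbr.symm])]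
      refine ⟨e1, e2, ?_⟩
      show some (pvPfx row_keys row_cols k (m - 1)) = some (pvPfx row_keys row_cols k (m + 1 - 1))
      rw [show m + 1 - 1 = m by omega, hbr]
    · -- break at row m
      rw [e3, if_pos (by simp [hbr]), if_pos (by simpa [hbc] using fun h => hbr h.symm)]
      have hc : ((m - 1 : Nat) : Int) + 1 = (m : Int) := by omega
      refine ⟨?_, ?_, ?_⟩
      · show PySem.Dict.insert _ _ ((m : Int) - (pvInnerA row_keys row_cols k m).2.1) = _
        rw [e1, e2, hc]
      · show (m : Int) = ((m - 1 : Nat) : Int) + 1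
        omega
      · show some (pvPfx row_keys row_cols k m) = some (pvPfx row_keys row_cols k (m + 1 - 1))
        rw [show m + 1 - 1 = m by omega]

theorem build_row_span_map_py_spec : Claim_equal_build_row_span_map_py := by
  intro row_keys row_cols _
  unfold Spec_build_row_span_map_py
  by_cases h : row_cols = [] ∨ row_keys = []
  · unfold build_row_span_map_py build_row_span_map_py_alt
    rw [if_pos h, if_pos h]
  · rw [not_or] at h
    rw [pv_portA_eq _ _ (by tauto), pv_portB_eq _ _ (by tauto)]
    apply List.map_congr_left
    intro k hk
    rw [List.mem_range] at hk
    have hn1 : 1 ≤ row_keys.length := List.length_pos_of_ne_nil h.2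
    obtain ⟨e1, e2, _⟩ := pv_inv row_keys row_cols h.2 k hk row_keys.length hn1 le_rfl
    rw [pv_innerA_succ]
    unfold pvStepA
    rw [if_pos (Or.inl rfl)]
    simp only [e1, e2]
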